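-- pv_equiv track=rewrite | github.com/jbocane6/holbertonschool-interview | 0x22-primegame/0-prime_game.py | analizar_si_quedan_movimientos
-- ===== SOURCE A (Python) =====
-- def Verificar_primo_y_existencia(numero):
--     """prueba"""
--     if numero == 2:
--         indicador2 = True
--     else:
--         if numero < 2:
--             indicador2 = False
--         else:
--
--             for test in list(range(2,numero)):
--
--                 if numero % test == 0:
--                     indicador2 = False
--                     break
--                 else:
--                     indicador2 = True
--
--
--     if  indicador2:
--         return True
--     else:
--         return False
--
-- def analizar_si_quedan_movimientos(vector):
--     """prueba"""
--     for i in vector: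
--         if Verificar_primo_y_existencia(i):
--             movimientos = True
--             break
--         else:
--             movimientos = False
--
--     return movimientos
-- ===== SOURCE B (Python) =====
-- def es_primo(n):
--     """Primality by trial division by d while d*d <= n."""
--     if n < 2:
--         return False
--     d = 2
--     while d * d <= n:
--         if n % d == 0:
--             return False
--         d += 1
--     return True
--
--
-- def analizar_si_quedan_movimientos(vector):
--     """True iff some element of vector is prime."""
--     return any(es_primo(i) for i in vector)
-- ===== Notes on version B (the rewrite author's own statement) =====
-- stated objective: alternative
-- what changed: B tests each number for primality by trial division only up to sqrt(n) and folds the scan into any() with early exit, instead of A's scan of every candidate divisor in range(2, n) with break/flag state.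
import Mathlib
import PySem

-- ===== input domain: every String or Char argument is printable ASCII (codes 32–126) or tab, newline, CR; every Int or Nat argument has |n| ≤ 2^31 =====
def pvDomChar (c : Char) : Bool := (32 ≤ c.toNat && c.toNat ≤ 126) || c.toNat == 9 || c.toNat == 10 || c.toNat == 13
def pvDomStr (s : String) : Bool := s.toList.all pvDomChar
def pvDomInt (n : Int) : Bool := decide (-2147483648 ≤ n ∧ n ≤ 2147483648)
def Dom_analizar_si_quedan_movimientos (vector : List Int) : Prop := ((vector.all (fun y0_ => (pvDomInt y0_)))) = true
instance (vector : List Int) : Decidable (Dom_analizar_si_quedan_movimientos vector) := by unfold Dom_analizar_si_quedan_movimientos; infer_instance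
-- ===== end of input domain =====

-- B replaces A's per-number divisor scan over range(2, n) by trial division up to sqrt(n) with
-- early exit via any() (objective: alternative).

-- ===== PORT A =====
-- A's inner for-loop over range(2, numero): break with False on the first divisor, else the last
-- iteration leaves True.  The [] case is unreachable from Verificar (range(2, numero) is nonempty
-- there since numero > 2).
def pvVerLoop (numero : Int) : List Int → Bool
  | [] => true
  | t :: ts => if PySem.Int.mod numero t = 0 then false else pvVerLoop numero ts

def Verificar_primo_y_existencia (numero : Int) : Bool :=
  if numero = 2 then true
  else if numero < 2 then false
  else pvVerLoop numero (PySem.List.pyRange 2 numero 1)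

-- A's main loop: break with True on the first prime, else leave False.  On [] Python raises
-- UnboundLocalError ('movimientos' unbound); that input is excluded by Pre_ below.
def analizar_si_quedan_movimientos : List Int → Bool
  | [] => false
  | i :: rest =>
    if Verificar_primo_y_existencia i then true
    else analizar_si_quedan_movimientos rest

-- ===== PORT B =====
-- Source B's while-loop: d runs from 2 while d*d <= n.
def pvTrial (n : Int) (d : Int) : Bool :=
  if _h : d * d ≤ n then
    if PySem.Int.mod n d = 0 then false else pvTrial n (d + 1)
  else true
termination_by (n + 1 - d).toNat
decreasing_by
  have hd : d ≤ n := by nlinarith [sq_nonneg d, sq_nonneg (d - 1)]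
  omega

def es_primo (n : Int) : Bool :=
  if n < 2 then false else pvTrial n 2

def analizar_si_quedan_movimientos_alt (vector : List Int) : Bool :=
  vector.any es_primo

-- ===== PRECONDITION & SPEC =====
-- Pre_ excludes only the empty list, on which A raises UnboundLocalError ('movimientos' is never assigned).
def Pre_analizar_si_quedan_movimientos (vector : List Int) : Prop := vector ≠ []
instance (vector : List Int) : Decidable (Pre_analizar_si_quedan_movimientos vector) := by
  unfold Pre_analizar_si_quedan_movimientos; infer_instance

def pvWitness_analizar_si_quedan_movimientos : List Int := [2]

def Spec_analizar_si_quedan_movimientos (vector : List Int) (out : Bool) : Prop :=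
  out = analizar_si_quedan_movimientos_alt vector
instance (vector : List Int) (out : Bool) : Decidable (Spec_analizar_si_quedan_movimientos vector out) := by
  unfold Spec_analizar_si_quedan_movimientos; infer_instance

-- ===== CLAIM (what is proved, stated in full; the proofs are below) =====
def Claim_equal_analizar_si_quedan_movimientos : Prop :=
  ∀ (vector : List Int), Dom_analizar_si_quedan_movimientos vector →
    Pre_analizar_si_quedan_movimientos vector →
      Spec_analizar_si_quedan_movimientos vector (analizar_si_quedan_movimientos vector)

-- ===== LEMMAS AND PROOFS =====

-- A's inner loop returns true iff no element of the list divides numero.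
theorem pvVerLoop_eq_true_iff (numero : Int) (ts : List Int) :
    pvVerLoop numero ts = true ↔ ∀ t ∈ ts, ¬ (PySem.Int.mod numero t = 0) := by
  induction ts with
  | nil => simp [pvVerLoop]
  | cons t ts ih =>
    by_cases h : PySem.Int.mod numero t = 0 <;> simp [pvVerLoop, h, ih]

-- B's while-loop returns true iff no candidate e ≥ d with e*e ≤ n divides n (for 2 ≤ d).
theorem pvTrial_eq_true_iff (n d : Int) (hd : 2 ≤ d) :
    pvTrial n d = true ↔ ∀ e : Int, d ≤ e → e * e ≤ n → ¬ (PySem.Int.mod n e = 0) := by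
  revert hd
  fun_induction pvTrial n d with
  | case1 d h hmod =>
    intro hd
    simp only [Bool.false_eq_true, false_iff]
    intro H; exact H d le_rfl h hmod
  | case2 d h hmod ih =>
    intro hd
    rw [ih (by omega)]
    constructor
    · intro H e hde hee
      rcases eq_or_lt_of_le hde with heq | hlt
      · subst heq; exact hmod
      · exact H e (by omega) hee
    · intro H e hde hee; exact H e (by omega) hee
  | case3 d h =>
    intro hd
    simp only [true_iff]
    intro e hde hee
    exact absurd (le_trans (by nlinarith : d * d ≤ e * e) hee) h

-- the number-theoretic core: for n > 2, having no divisor up to sqrt(n) is having no proper divisor.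
theorem pv_sqrt_divisor (n : Int) (hn : 2 < n) :
    (∀ e : Int, 2 ≤ e → e * e ≤ n → ¬ e ∣ n) ↔ (∀ t : Int, 2 ≤ t → t < n → ¬ t ∣ n) := by
  constructor
  · intro H t ht2 htn hdvd
    by_cases hsq : t * t ≤ n
    · exact H t ht2 hsq hdvd
    · obtain ⟨k, hk⟩ := hdvd
      have hk2 : 2 ≤ k := by nlinarith
      have hkt : k < t := by nlinarith
      have hkk : k * k ≤ n := by nlinarith
      exact H k hk2 hkk ⟨t, by linarith [hk]⟩
  · intro H e he2 hee hdvd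
    have hen : e < n := by nlinarith
    exact H e he2 hen hdvd

theorem pv_ver_eq_es_primo (n : Int) : Verificar_primo_y_existencia n = es_primo n := by
  unfold Verificar_primo_y_existencia es_primo
  by_cases h2 : n = 2
  · subst h2
    rw [pvTrial]
    norm_num
  · by_cases hlt : n < 2
    · simp [h2, hlt]
    · have hn : 2 < n := by omega
      simp only [h2, if_false, hlt, if_false]
      rw [Bool.eq_iff_iff, pvVerLoop_eq_true_iff, pvTrial_eq_true_iff n 2 le_rfl]
      simp only [PySem.List.mem_pyRange_one, PySem.Int.mod_eq_zero_iff_dvd]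
      constructor
      · intro H e he2 hee
        exact ((pv_sqrt_divisor n hn).mpr (fun t ht2 htn => H t ⟨ht2, htn⟩)) e he2 hee
      · intro H t ⟨ht2, htn⟩
        exact ((pv_sqrt_divisor n hn).mp H) t ht2 htn

theorem pv_main_eq (vector : List Int) :
    analizar_si_quedan_movimientos vector = analizar_si_quedan_movimientos_alt vector := by
  induction vector with
  | nil => rfl
  | cons i rest ih =>
    simp only [analizar_si_quedan_movimientos, analizar_si_quedan_movimientos_alt,
      List.any_cons, pv_ver_eq_es_primo i]
    by_cases h : es_primo i <;> simp [h, ih, analizar_si_quedan_movimientos_alt]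

-- ===== VERDICT (by name: the statement is the Claim_ definition above) =====
theorem analizar_si_quedan_movimientos_spec : Claim_equal_analizar_si_quedan_movimientos := by
  intro vector _ _
  exact pv_main_eq vector
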